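-- pv_equiv track=rewrite | github.com/timvieira/arsenal | arsenal/maths/combinatorics/basics.py | segmentations
-- ===== SOURCE A (Python) =====
-- def segmentations(S):
--     "Enumerate all segmentations of S"
--     N = len(S)
--     p = [[] for _ in range(N+1)]
--     p[0] = [()]
--     for t in range(1, N+1):
--         for s in range(t):
--             p[t] += [prefix + (tuple(S[s:t]),) for prefix in p[s]]
--     return p[N]
-- ===== SOURCE B (Python) =====
-- def segmentations(S):
--     "Enumerate all segmentations of S"
--     N = len(S)
--     if N == 0:
--         return [()]
--     out = [(tuple(S),)]
--     for mask in range(1, 1 << (N - 1)):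
--         h = mask.bit_length() - 1          # highest cut bit: cut after index h
--         prev = out[mask - (1 << h)]        # same lower cuts, no cut after h
--         s = N - len(prev[-1])              # start of prev's (open) last segment
--         out.append(prev[:-1] + (tuple(S[s:h + 1]), tuple(S[h + 1:N])))
--     return out
-- ===== Notes on version B (the rewrite author's own statement) =====
-- stated objective: alternative
-- what changed: Replaced the O(N^2)-pass table dynamic program over all prefixes by a single loop over the 2^(N-1) cut bitmasks in binary-counting order, where each segmentation is obtained from the already-emitted one with the highest cut bit cleared by splitting its last segment.
import Mathlib
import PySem

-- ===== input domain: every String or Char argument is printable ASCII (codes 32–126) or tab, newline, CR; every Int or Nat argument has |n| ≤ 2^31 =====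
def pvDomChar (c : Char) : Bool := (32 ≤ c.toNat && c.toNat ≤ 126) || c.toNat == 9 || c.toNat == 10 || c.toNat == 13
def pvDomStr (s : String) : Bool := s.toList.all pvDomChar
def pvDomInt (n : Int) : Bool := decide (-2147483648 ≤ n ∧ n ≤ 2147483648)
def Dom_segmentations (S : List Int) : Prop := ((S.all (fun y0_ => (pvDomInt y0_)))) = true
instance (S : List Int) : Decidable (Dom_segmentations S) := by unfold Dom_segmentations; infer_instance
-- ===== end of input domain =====

-- B replaces A's table-of-all-prefixes dynamic program by a direct bitmask enumeration of the
-- N-1 cut positions (same output, same order); objective: alternative algorithm, no table.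

-- ===== PORT A =====
-- A: p = [[] for _ in range(N+1)]; p[0] = [()]; for t in range(1, N+1): for s in range(t):
--    p[t] += [prefix + (tuple(S[s:t]),) for prefix in p[s]];  return p[N]
def segmentations (S : List Int) : List (List (List Int)) :=
  let N := S.length
  let p : List (List (List (List Int))) := (List.range (N + 1)).map (fun _ => [])
  let p := p.set 0 [[]]
  let p := (List.range' 1 N).foldl (fun p t =>
    (List.range t).foldl (fun p s =>
      p.set t (p.getD t [] ++
        (p.getD s []).map (fun pre =>
          pre ++ [PySem.List.slice S (some (s : Int)) (some (t : Int))]))) p) p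
  p.getD N []

-- ===== PORT B =====
-- B: if N == 0: return [()]; else out = [(tuple(S),)]; for mask in range(1, 1 << (N-1)):
--    h = mask.bit_length()-1 (= Nat.log2 mask for mask >= 1); prev = out[mask - (1<<h)];
--    s = N - len(prev[-1]); out.append(prev[:-1] + (tuple(S[s:h+1]), tuple(S[h+1:N]))).
def segmentations_alt (S : List Int) : List (List (List Int)) :=
  let N := S.length
  if N = 0 then [[]]
  else
    (List.range' 1 (2 ^ (N - 1) - 1)).foldl (fun out mask =>
      let h := Nat.log2 mask
      let prev := out.getD (mask - 2 ^ h) []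
      let s := N - ((PySem.List.pyGet? prev (-1)).getD []).length
      out ++ [PySem.List.slice prev none (some (-1))
        ++ [PySem.List.slice S (some (s : Int)) (some ((h + 1 : Nat) : Int)),
            PySem.List.slice S (some ((h + 1 : Nat) : Int)) (some ((N : Nat) : Int))]]) [[S]]

-- ===== PRECONDITION & SPEC =====
def Spec_segmentations (S : List Int) (out : List (List (List Int))) : Prop := out = segmentations_alt S
instance (S : List Int) (out : List (List (List Int))) : Decidable (Spec_segmentations S out) := by unfold Spec_segmentations; infer_instance

-- ===== CLAIM (what is proved, stated in full; the proofs are below) =====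
def Claim_equal_segmentations : Prop := ∀ (S : List Int), Dom_segmentations S → Spec_segmentations S (segmentations S)

-- ===== LEMMAS AND PROOFS =====

-- Canonical recursive description of the common value: a segmentation of a nonempty S is a
-- segmentation of a proper prefix S[:s] followed by the final segment S[s:].
def canon (S : List Int) : List (List (List Int)) :=
  if S.isEmpty then [[]]
  else (List.range S.length).attach.flatMap (fun s =>
    (canon (S.take s.1)).map (fun pre => pre ++ [S.drop s.1]))
termination_by S.length
decreasing_by
  have hs := List.mem_range.mp s.2
  simp only [List.length_take]
  omega

lemma canon_nil : canon ([] : List Int) = [[]] := by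
  rw [canon]; rfl

lemma canon_eq (S : List Int) (h : S ≠ []) :
    canon S = (List.range S.length).flatMap (fun s =>
      (canon (S.take s)).map (fun pre => pre ++ [S.drop s])) := by
  rw [canon]
  simp [List.isEmpty_iff, h, List.flatMap_def]

lemma slice_take (S : List Int) (a b m : Nat) (hb : b ≤ m) :
    PySem.List.slice (S.take m) (some (a : Int)) (some (b : Int))
      = PySem.List.slice S (some (a : Int)) (some (b : Int)) := by
  rw [PySem.List.slice_natCast, PySem.List.slice_natCast, List.drop_take, List.take_take]
  congr 1
  omega

-- ---------- A-side: the table DP computes canon on every prefix ----------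

def stepA (S : List Int) (p : List (List (List (List Int)))) (t : Nat) :
    List (List (List (List Int))) :=
  (List.range t).foldl (fun p s =>
    p.set t (p.getD t [] ++
      (p.getD s []).map (fun pre =>
        pre ++ [PySem.List.slice S (some (s : Int)) (some (t : Int))]))) p

def tabA (S : List Int) (k : Nat) : List (List (List (List Int))) :=
  (List.range' 1 k).foldl (stepA S)
    (((List.range (S.length + 1)).map (fun _ => ([] : List (List (List Int))))).set 0 [[]])

-- one inner loop 'for s in range(t): p[t] += f s p[s]' is a single set of slot t
lemma inner_fold (f : Nat → List (List (List Int)) → List (List (List Int))) (t : Nat) :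
    ∀ (L : List Nat) (p : List (List (List (List Int)))),
      (∀ s ∈ L, s < t) → t < p.length →
      L.foldl (fun q s => q.set t (q.getD t [] ++ f s (q.getD s []))) p
        = p.set t (p.getD t [] ++ L.flatMap (fun s => f s (p.getD s []))) := by
  intro L
  induction L with
  | nil =>
      intro p _ ht
      simp only [List.foldl_nil, List.flatMap_nil, List.append_nil]
      conv_lhs => rw [← List.set_getElem_self ht]
      rw [List.getD_eq_getElem?_getD, List.getElem?_eq_getElem ht]
      rfl
  | cons s L ih =>
      intro p hL ht
      have hs : s < t := hL s (by simp)
      set X := p.getD t [] ++ f s (p.getD s []) with hX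
      have hlen : t < (p.set t X).length := by simpa using ht
      rw [List.foldl_cons, ih (p.set t X) (fun x hx => hL x (by simp [hx])) hlen]
      have hgt : (p.set t X).getD t [] = X := by
        rw [List.getD_eq_getElem?_getD, List.getElem?_set_self ht]; rfl
      have hgs : ∀ x, x ≠ t → (p.set t X).getD x [] = p.getD x [] := by
        intro x hx
        rw [List.getD_eq_getElem?_getD, List.getElem?_set_ne (by omega), ← List.getD_eq_getElem?_getD]
      have hflat : List.flatMap (fun x => f x ((p.set t X).getD x [])) L
          = List.flatMap (fun x => f x (p.getD x [])) L := by
        apply List.flatMap_congr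
        intro x hx
        rw [hgs x (by have := hL x (by simp [hx]); omega)]
      rw [List.set_set, hgt, hflat, List.flatMap_cons, hX, List.append_assoc]

lemma canon_take (S : List Int) (k : Nat) (hk : k + 1 ≤ S.length) :
    canon (S.take (k + 1)) = (List.range (k + 1)).flatMap (fun s =>
      (canon (S.take s)).map (fun pre =>
        pre ++ [PySem.List.slice S (some (s : Int)) (some ((k + 1 : Nat) : Int))])) := by
  have hlen : (S.take (k + 1)).length = k + 1 := by simp [List.length_take]; omega
  have hne : S.take (k + 1) ≠ [] := by
    intro h; rw [h] at hlen; simp at hlen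
  rw [canon_eq _ hne, hlen]
  apply List.flatMap_congr
  intro s hs
  have hs' : s < k + 1 := List.mem_range.mp hs
  rw [List.take_take, min_eq_left (by omega), List.drop_take, PySem.List.slice_natCast]

lemma tabA_inv (S : List Int) : ∀ (k : Nat), k ≤ S.length →
    (tabA S k).length = S.length + 1 ∧
    ∀ t, (tabA S k).getD t [] = if t ≤ k then canon (S.take t) else [] := by
  intro k
  induction k with
  | zero =>
      intro _
      constructor
      · simp [tabA]
      · intro t
        unfold tabA
        simp only [List.range'_zero, List.foldl_nil]
        rcases Nat.eq_zero_or_pos t with h | h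
        · subst h
          rw [List.getD_eq_getElem?_getD, List.getElem?_set_self (by simp)]
          simp [canon_nil]
        · rw [List.getD_eq_getElem?_getD, List.getElem?_set_ne (by omega)]
          simp only [Nat.le_zero]
          rw [if_neg (by omega), List.getElem?_map]
          cases (List.range (S.length + 1))[t]? <;> rfl
  | succ k ih =>
      intro hk
      obtain ⟨ihl, ihg⟩ := ih (by omega)
      have hr : List.range' 1 (k + 1) = List.range' 1 k ++ [k + 1] := by
        rw [List.range'_concat, Nat.one_mul, Nat.add_comm]
      have hstep : tabA S (k + 1) = stepA S (tabA S k) (k + 1) := by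
        unfold tabA
        rw [hr, List.foldl_append, List.foldl_cons, List.foldl_nil]
      have hset : stepA S (tabA S k) (k + 1)
          = (tabA S k).set (k + 1) ((tabA S k).getD (k + 1) []
              ++ (List.range (k + 1)).flatMap (fun s =>
                ((tabA S k).getD s []).map (fun pre =>
                  pre ++ [PySem.List.slice S (some (s : Int)) (some ((k + 1 : Nat) : Int))]))) := by
        unfold stepA
        exact inner_fold _ (k + 1) (List.range (k + 1)) (tabA S k)
          (fun s hs => List.mem_range.mp hs) (by rw [ihl]; omega)
      have hval : (tabA S k).getD (k + 1) []
          ++ (List.range (k + 1)).flatMap (fun s =>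
              ((tabA S k).getD s []).map (fun pre =>
                pre ++ [PySem.List.slice S (some (s : Int)) (some ((k + 1 : Nat) : Int))]))
          = canon (S.take (k + 1)) := by
        rw [ihg (k + 1), if_neg (by omega), List.nil_append, canon_take S k hk]
        apply List.flatMap_congr
        intro s hs
        rw [ihg s, if_pos (by have := List.mem_range.mp hs; omega)]
      rw [hstep, hset, hval]
      constructor
      · simpa using ihl
      · intro t
        rcases eq_or_ne t (k + 1) with h | h
        · subst h
          rw [List.getD_eq_getElem?_getD, List.getElem?_set_self (by rw [ihl]; omega),
            if_pos (by omega)]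
          rfl
        · rw [List.getD_eq_getElem?_getD, List.getElem?_set_ne (by omega),
            ← List.getD_eq_getElem?_getD, ihg t]
          rcases Nat.lt_or_ge t (k + 1) with h2 | h2
          · rw [if_pos (by omega), if_pos (by omega)]
          · rw [if_neg (by omega), if_neg (by omega)]

lemma segA_eq_canon (S : List Int) : segmentations S = canon S := by
  have h : segmentations S = (tabA S S.length).getD S.length [] := rfl
  rw [h, (tabA_inv S S.length le_rfl).2 S.length, if_pos le_rfl, List.take_length]

-- ---------- B-side: the bitmask enumeration also computes canon ----------

def stepB (S : List Int) (mask : Nat) (st : List (List Int) × Nat) (b : Nat) :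
    List (List Int) × Nat :=
  if (mask >>> b) % 2 = 1 then
    (st.1 ++ [PySem.List.slice S (some (st.2 : Int)) (some ((b + 1 : Nat) : Int))], b + 1)
  else st

def elemB (S : List Int) (N mask : Nat) : List (List Int) :=
  let st := (List.range (N - 1)).foldl (stepB S mask) ([], 0)
  st.1 ++ [PySem.List.slice S (some (st.2 : Int)) (some ((N : Nat) : Int))]

-- bits of 2^h + m' (m' < 2^h): equal to m' below h, set at h, clear above h
lemma bit_lt (h m' b : Nat) (hb : b < h) : ((2 ^ h + m') >>> b) % 2 = (m' >>> b) % 2 := by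
  rw [Nat.shiftRight_eq_div_pow, Nat.shiftRight_eq_div_pow]
  have h1 : 2 ^ h + m' = m' + 2 ^ (h - b) * 2 ^ b := by
    rw [← pow_add]
    have : h - b + b = h := by omega
    rw [this]; omega
  rw [h1, Nat.add_mul_div_right _ _ (Nat.two_pow_pos b)]
  have h2 : 2 ^ (h - b) = 2 ^ (h - b - 1) * 2 := by
    rw [← pow_succ]
    congr 1
    omega
  rw [h2, Nat.add_mul_mod_self_right]

lemma bit_self (h m' : Nat) (hm : m' < 2 ^ h) : ((2 ^ h + m') >>> h) % 2 = 1 := by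
  rw [Nat.shiftRight_eq_div_pow]
  have h1 : 2 ^ h + m' = m' + 1 * 2 ^ h := by omega
  rw [h1, Nat.add_mul_div_right _ _ (Nat.two_pow_pos h), Nat.div_eq_of_lt hm]

lemma bit_gt (h m' b : Nat) (hb : h < b) (hm : m' < 2 ^ h) :
    ((2 ^ h + m') >>> b) % 2 = 0 := by
  rw [Nat.shiftRight_eq_div_pow, Nat.div_eq_of_lt, Nat.zero_mod]
  calc 2 ^ h + m' < 2 ^ (h + 1) := by rw [pow_succ]; omega
    _ ≤ 2 ^ b := Nat.pow_le_pow_right (by omega) (by omega)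

lemma fold_stepB_zero (S : List Int) (L : List Nat) (st : List (List Int) × Nat) :
    L.foldl (stepB S 0) st = st := by
  rw [PySem.List.foldl_congr_mem L (stepB S 0) (fun st _ => st) st ?_, PySem.List.foldl_ignore]
  intro st b _
  simp [stepB, Nat.zero_shiftRight]

lemma elemB_zero (S : List Int) : elemB S S.length 0 = [S] := by
  unfold elemB
  rw [fold_stepB_zero]
  simp


lemma elemB_decomp (S : List Int) (h m' : Nat) (hm : m' < 2 ^ h) (hh : h < S.length - 1) :
    elemB S S.length (2 ^ h + m')
      = (elemB (S.take (h + 1)) (h + 1) m')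
          ++ [PySem.List.slice S (some ((h + 1 : Nat) : Int)) (some ((S.length : Nat) : Int))] := by
  unfold elemB
  have hsplit : S.length - 1 = (h + 1) + (S.length - 2 - h) := by omega
  rw [hsplit, List.range_add, List.foldl_append, List.range_succ, List.foldl_append,
    List.foldl_cons, List.foldl_nil]
  -- the fold over range h agrees with the recursive call's fold on the prefix
  have hpre : (List.range h).foldl (stepB S (2 ^ h + m')) ([], 0)
      = (List.range h).foldl (stepB (S.take (h + 1)) m') ([], 0) := by
    apply PySem.List.foldl_congr_mem
    intro st b hb
    have hb' : b < h := List.mem_range.mp hb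
    unfold stepB
    rw [bit_lt h m' b hb', slice_take S st.2 (b + 1) (h + 1) (by omega)]
  rw [hpre]
  set st1 := (List.range h).foldl (stepB (S.take (h + 1)) m') ([], 0) with hst1
  -- at b = h the bit is set: close the segment at h+1
  have hat : stepB S (2 ^ h + m') st1 h
      = (st1.1 ++ [PySem.List.slice (S.take (h + 1)) (some (st1.2 : Int))
          (some ((h + 1 : Nat) : Int))], h + 1) := by
    unfold stepB
    rw [bit_self h m' hm, if_pos rfl, slice_take S st1.2 (h + 1) (h + 1) le_rfl]
  rw [hat]
  -- the remaining positions have clear bits: no-op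
  have htail : (List.map (fun x => h + 1 + x) (List.range (S.length - 2 - h))).foldl
      (stepB S (2 ^ h + m'))
      (st1.1 ++ [PySem.List.slice (S.take (h + 1)) (some (st1.2 : Int))
        (some ((h + 1 : Nat) : Int))], h + 1)
      = (st1.1 ++ [PySem.List.slice (S.take (h + 1)) (some (st1.2 : Int))
        (some ((h + 1 : Nat) : Int))], h + 1) := by
    rw [PySem.List.foldl_congr_mem _ _ (fun st _ => st) _ ?_, PySem.List.foldl_ignore]
    intro st b hb
    obtain ⟨x, _, hx⟩ := List.mem_map.mp hb
    unfold stepB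
    rw [← hx, bit_gt h m' (h + 1 + x) (by omega) hm]
    simp
  rw [htail]
  simp only [Nat.add_sub_cancel]
  rw [← hst1]


lemma bit_ge (h b m' : Nat) (hb : h ≤ b) (hm : m' < 2 ^ h) : (m' >>> b) % 2 = 0 := by
  rw [Nat.shiftRight_eq_div_pow,
    Nat.div_eq_of_lt (lt_of_lt_of_le hm (Nat.pow_le_pow_right (by omega) hb)), Nat.zero_mod]

lemma fold_snd_le (S : List Int) (mask h : Nat) :
    ∀ (L : List Nat) (st : List (List Int) × Nat), (∀ b ∈ L, b < h) → st.2 ≤ h →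
      (L.foldl (stepB S mask) st).2 ≤ h := by
  intro L
  induction L with
  | nil => intro st _ hst; exact hst
  | cons b L ihL =>
      intro st hL hst
      rw [List.foldl_cons]
      apply ihL _ (fun x hx => hL x (by simp [hx]))
      unfold stepB
      split
      · exact hL b (by simp)
      · exact hst

-- a mask below 2^h never fires beyond position h: the scan stops changing there
lemma fold_stepB_highzero (S : List Int) (m' h : Nat) (hm : m' < 2 ^ h)
    (hN : h ≤ S.length - 1) :
    (List.range (S.length - 1)).foldl (stepB S m') ([], 0)
      = (List.range h).foldl (stepB S m') ([], 0) := by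
  have hsplit : S.length - 1 = h + (S.length - 1 - h) := by omega
  rw [hsplit, List.range_add, List.foldl_append]
  rw [PySem.List.foldl_congr_mem _ _ (fun st _ => st) _ ?_, PySem.List.foldl_ignore]
  intro st b hb
  obtain ⟨x, _, hx⟩ := List.mem_map.mp hb
  unfold stepB
  rw [← hx, bit_ge h (h + x) m' (by omega) hm]
  simp

-- setting the highest bit h on a mask m' < 2^h splits the last segment of m''s segmentation,
-- exactly as B's loop body computes it from the already-emitted entry
lemma elemB_succ (S : List Int) (h m' : Nat) (hm : m' < 2 ^ h) (hh : h < S.length - 1) :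
    elemB S S.length (2 ^ h + m')
      = PySem.List.slice (elemB S S.length m') none (some (-1))
        ++ [PySem.List.slice S
              (some ((S.length
                - ((PySem.List.pyGet? (elemB S S.length m') (-1)).getD []).length : Nat) : Int))
              (some ((h + 1 : Nat) : Int)),
            PySem.List.slice S (some ((h + 1 : Nat) : Int)) (some ((S.length : Nat) : Int))] := by
  set c := (List.range h).foldl (stepB S m') ([], 0) with hc
  have hr : c.2 ≤ h := by
    rw [hc]
    exact fold_snd_le S m' h (List.range h) ([], 0)
      (fun b hb => List.mem_range.mp hb) (by omega)
  have h1 : elemB S S.length m'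
      = c.1 ++ [PySem.List.slice S (some (c.2 : Int)) (some ((S.length : Nat) : Int))] := by
    unfold elemB
    rw [fold_stepB_highzero S m' h hm (by omega)]
  have hlast : PySem.List.pyGet? (elemB S S.length m') (-1)
      = some (PySem.List.slice S (some (c.2 : Int)) (some ((S.length : Nat) : Int))) := by
    rw [h1]
    simp [PySem.List.pyGet?, PySem.List.pyIdx?]
  have hlen : (PySem.List.slice S (some (c.2 : Int)) (some ((S.length : Nat) : Int))).length
      = S.length - c.2 := by
    rw [PySem.List.slice_natCast]
    simp [List.length_take, List.length_drop]
  have hs : S.length - ((PySem.List.pyGet? (elemB S S.length m') (-1)).getD []).length = c.2 := by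
    rw [hlast, Option.getD_some, hlen]
    omega
  have hdrop : PySem.List.slice (elemB S S.length m') none (some (-1)) = c.1 := by
    rw [PySem.List.slice_to_neg_one, h1, List.dropLast_concat]
  have hfold2 : (List.range (S.length - 1)).foldl (stepB S (2 ^ h + m')) ([], 0)
      = (c.1 ++ [PySem.List.slice S (some (c.2 : Int)) (some ((h + 1 : Nat) : Int))], h + 1) := by
    have hsplit : S.length - 1 = (h + 1) + (S.length - 2 - h) := by omega
    rw [hsplit, List.range_add, List.foldl_append, List.range_succ, List.foldl_append,
      List.foldl_cons, List.foldl_nil]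
    have hpre : (List.range h).foldl (stepB S (2 ^ h + m')) ([], 0) = c := by
      rw [hc]
      apply PySem.List.foldl_congr_mem
      intro st b hb
      unfold stepB
      rw [bit_lt h m' b (List.mem_range.mp hb)]
    rw [hpre]
    have hat : stepB S (2 ^ h + m') c h
        = (c.1 ++ [PySem.List.slice S (some (c.2 : Int)) (some ((h + 1 : Nat) : Int))], h + 1) := by
      unfold stepB
      rw [bit_self h m' hm, if_pos rfl]
    rw [hat]
    rw [PySem.List.foldl_congr_mem _ _ (fun st _ => st) _ ?_, PySem.List.foldl_ignore]
    intro st b hb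
    obtain ⟨x, _, hx⟩ := List.mem_map.mp hb
    unfold stepB
    rw [← hx, bit_gt h m' (h + 1 + x) (by omega) hm]
    simp
  rw [hs, hdrop]
  unfold elemB
  rw [hfold2]
  simp

-- B's loop body and its iterates, named for the invariant proof
def bodyB (S : List Int) (out : List (List (List Int))) (mask : Nat) :
    List (List (List Int)) :=
  let h := Nat.log2 mask
  let prev := out.getD (mask - 2 ^ h) []
  let s := S.length - ((PySem.List.pyGet? prev (-1)).getD []).length
  out ++ [PySem.List.slice prev none (some (-1))
    ++ [PySem.List.slice S (some (s : Int)) (some ((h + 1 : Nat) : Int)),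
        PySem.List.slice S (some ((h + 1 : Nat) : Int)) (some ((S.length : Nat) : Int))]]

def outB (S : List Int) (k : Nat) : List (List (List Int)) :=
  (List.range' 1 k).foldl (bodyB S) [[S]]

lemma outB_inv (S : List Int) : ∀ (k : Nat), k ≤ 2 ^ (S.length - 1) - 1 →
    (outB S k).length = k + 1 ∧
    ∀ m, m ≤ k → (outB S k).getD m [] = elemB S S.length m := by
  intro k
  induction k with
  | zero =>
      intro _
      refine ⟨rfl, ?_⟩
      intro m hm
      have : m = 0 := by omega
      subst this
      rw [elemB_zero]
      rfl
  | succ k ih =>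
      intro hk
      obtain ⟨ihl, ihg⟩ := ih (by omega)
      have hr : List.range' 1 (k + 1) = List.range' 1 k ++ [k + 1] := by
        rw [List.range'_concat, Nat.one_mul, Nat.add_comm]
      have hstep : outB S (k + 1) = bodyB S (outB S k) (k + 1) := by
        unfold outB
        rw [hr, List.foldl_append, List.foldl_cons, List.foldl_nil]
      have hmask0 : k + 1 ≠ 0 := by omega
      have hlow : 2 ^ Nat.log2 (k + 1) ≤ k + 1 := Nat.log2_self_le hmask0
      have hhigh : k + 1 < 2 ^ (Nat.log2 (k + 1) + 1) := Nat.lt_log2_self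
      have hm' : k + 1 - 2 ^ Nat.log2 (k + 1) < 2 ^ Nat.log2 (k + 1) := by
        rw [pow_succ] at hhigh
        omega
      have hp : 0 < 2 ^ (S.length - 1) := Nat.two_pow_pos _
      have hhlt : Nat.log2 (k + 1) < S.length - 1 := by
        rcases Nat.lt_or_ge (Nat.log2 (k + 1)) (S.length - 1) with hl2 | hcon
        · exact hl2
        · have := Nat.pow_le_pow_right (by omega : 1 ≤ 2) hcon
          omega
      have hmaskeq : 2 ^ Nat.log2 (k + 1) + (k + 1 - 2 ^ Nat.log2 (k + 1)) = k + 1 := by omega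
      have hprev : (outB S k).getD (k + 1 - 2 ^ Nat.log2 (k + 1)) []
          = elemB S S.length (k + 1 - 2 ^ Nat.log2 (k + 1)) := ihg _ (by omega)
      constructor
      · rw [hstep]
        unfold bodyB
        rw [List.length_append, ihl]
        rfl
      · intro m hm
        rw [hstep]
        unfold bodyB
        rcases Nat.lt_or_ge m (k + 1) with hlt | hge
        · rw [List.getD_append _ _ _ m (by rw [ihl]; omega)]
          exact ihg m (by omega)
        · have hmeq : m = k + 1 := by omega
          subst hmeq
          rw [List.getD_append_right _ _ _ _ (by rw [ihl])]
          rw [ihl, Nat.sub_self]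
          rw [hprev]
          rw [← elemB_succ S (Nat.log2 (k + 1)) (k + 1 - 2 ^ Nat.log2 (k + 1)) hm' hhlt,
            hmaskeq]
          rfl

lemma alt_eq_map (S : List Int) (h : ¬ S.length = 0) :
    segmentations_alt S = (List.range (2 ^ (S.length - 1))).map (elemB S S.length) := by
  have h1 : segmentations_alt S = outB S (2 ^ (S.length - 1) - 1) := by
    unfold segmentations_alt outB bodyB
    rw [if_neg h]
  obtain ⟨hl, hg⟩ := outB_inv S (2 ^ (S.length - 1) - 1) le_rfl
  have hp : 0 < 2 ^ (S.length - 1) := Nat.two_pow_pos _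
  rw [h1]
  apply List.ext_getElem
  · rw [hl, List.length_map, List.length_range]
    omega
  · intro i hi1 hi2
    have hi : i < 2 ^ (S.length - 1) := by
      rw [hl] at hi1
      omega
    rw [List.getElem_map, List.getElem_range]
    have hgi := hg i (by omega)
    rw [List.getD_eq_getElem?_getD, List.getElem?_eq_getElem hi1] at hgi
    simpa using hgi

lemma range_pow_two : ∀ (m : Nat), List.range (2 ^ m)
    = 0 :: (List.range m).flatMap (fun h => (List.range (2 ^ h)).map (fun m' => 2 ^ h + m')) := by
  intro m
  induction m with
  | zero => rfl
  | succ m ih =>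
      have h2 : 2 ^ (m + 1) = 2 ^ m + 2 ^ m := by rw [pow_succ]; omega
      rw [h2, List.range_add]
      nth_rewrite 1 [ih]
      rw [List.range_succ, List.flatMap_append, List.flatMap_cons,
        List.flatMap_nil, List.append_nil, List.cons_append]

lemma segB_eq_canon : ∀ (n : Nat) (S : List Int), S.length = n → segmentations_alt S = canon S := by
  intro n
  induction n using Nat.strong_induction_on with
  | _ n ih =>
      intro S hS
      by_cases h0 : S.length = 0
      · have : S = [] := List.eq_nil_of_length_eq_zero h0
        subst this
        rw [canon_nil]
        rfl
      · have hne : S ≠ [] := by intro h; rw [h] at h0; exact h0 rfl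
        rw [alt_eq_map S h0, range_pow_two, List.map_cons, List.map_flatMap, elemB_zero]
        rw [canon_eq S hne]
        have hr : List.range S.length
            = 0 :: (List.range (S.length - 1)).map (fun x => 1 + x) := by
          have h1 : List.range (1 + (S.length - 1))
              = List.range 1 ++ List.map (fun x => 1 + x) (List.range (S.length - 1)) :=
            List.range_add
          have h2 : 1 + (S.length - 1) = S.length := by omega
          rw [h2] at h1
          rw [h1]
          rfl
        rw [hr, List.flatMap_cons, List.flatMap_map]
        simp only [List.take_zero, List.drop_zero, canon_nil, List.map_cons, List.map_nil,
          List.nil_append, List.singleton_append]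
        congr 1
        apply List.flatMap_congr
        intro h hh
        have hh' : h < S.length - 1 := List.mem_range.mp hh
        have hlen' : (S.take (h + 1)).length = h + 1 := by
          simp [List.length_take]; omega
        rw [List.map_map]
        have hmap : List.map ((elemB S S.length) ∘ fun m' => 2 ^ h + m') (List.range (2 ^ h))
            = List.map (fun pre => pre ++ [PySem.List.slice S (some ((h + 1 : Nat) : Int))
                (some ((S.length : Nat) : Int))])
              (List.map (elemB (S.take (h + 1)) (h + 1)) (List.range (2 ^ h))) := by
          rw [List.map_map]
          apply List.map_congr_left
          intro m' hm'
          exact elemB_decomp S h m' (List.mem_range.mp hm') hh'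
        rw [hmap]
        have halt : List.map (elemB (S.take (h + 1)) (h + 1)) (List.range (2 ^ h))
            = segmentations_alt (S.take (h + 1)) := by
          rw [alt_eq_map (S.take (h + 1)) (by omega), hlen', Nat.add_sub_cancel]
        rw [halt, ih (h + 1) (by omega) (S.take (h + 1)) hlen']
        have hslice : PySem.List.slice S (some ((h + 1 : Nat) : Int))
            (some ((S.length : Nat) : Int)) = S.drop (h + 1) := by
          rw [PySem.List.slice_natCast]
          exact List.take_of_length_le (by simp)
        have hadd : 1 + h = h + 1 := Nat.add_comm 1 h
        rw [hslice, hadd]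

-- ===== VERDICT (by name: the statement is the Claim_ definition above) =====
theorem segmentations_spec : Claim_equal_segmentations := by
  intro S _
  unfold Spec_segmentations
  rw [segA_eq_canon, segB_eq_canon S.length S rfl]
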